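-- pv_equiv track=rewrite | github.com/SamuelVapps1/scalper | scalper/settings.py | _coerce_csv_list
-- ===== SOURCE A (Python) =====
-- from typing import Any, List, Optional
--
-- def _strip_inline_comment(value: Any) -> str:
--     """Remove inline comment after # or ; if not inside quotes. Trim whitespace."""
--     if value is None:
--         return ""
--     s = str(value).strip()
--     if not s:
--         return ""
--     # Simple: strip from first unquoted # or ;
--     out = []
--     i = 0
--     quote = None
--     while i < len(s):
--         c = s[i]
--         if quote:
--             if c == quote and (i + 1 >= len(s) or s[i + 1] != quote):
--                 quote = None
--             out.append(c)
--             i += 1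
--             continue
--         if c in ("'", '"'):
--             quote = c
--             out.append(c)
--             i += 1
--             continue
--         if c == "#" or (c == ";" and i > 0):
--             break
--         out.append(c)
--         i += 1
--     return "".join(out).strip()
--
-- def _normalize_empty(value: Any) -> Optional[str]:
--     """Treat '', 'none', 'null', 'None' as empty (return None). Otherwise return stripped string."""
--     if value is None:
--         return None
--     s = str(value).strip()
--     if not s:
--         return None
--     if s.lower() in ("none", "null"):
--         return None
--     return s
--
-- def _coerce_csv_list(value: Any) -> List[str]:
--     """Parse CSV string to list of stripped non-empty strings. Empty => []."""
--     s = _normalize_empty(value)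
--     if s is None:
--         return []
--     s = _strip_inline_comment(s)
--     if not s:
--         return []
--     return [x.strip() for x in s.split(",") if x.strip()]
-- ===== SOURCE B (Python) =====
-- from typing import Any, List
--
-- def _coerce_csv_list(value: Any) -> List[str]:
--     """Parse CSV string to list of stripped non-empty strings. Empty => []."""
--     if value is None:
--         return []
--     s = str(value).strip()
--     if not s or s.lower() in ("none", "null"):
--         return []
--     # One left-to-right scan: a quote state only decides whether '#'/';' ends the
--     # scan; every comma (even inside quotes) flushes the current token buffer.
--     tokens = []
--     buf = []
--     quote = None
--     for i, c in enumerate(s):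
--         if quote:
--             if c == quote and (i + 1 >= len(s) or s[i + 1] != quote):
--                 quote = None
--         elif c in ("'", '"'):
--             quote = c
--         elif c == "#" or (c == ";" and i > 0):
--             break
--         if c == ",":
--             tokens.append("".join(buf))
--             buf = []
--         else:
--             buf.append(c)
--     tokens.append("".join(buf))
--     return [t for t in (x.strip() for x in tokens) if t]
-- ===== Notes on version B (the rewrite author's own statement) =====
-- stated objective: alternative
-- what changed: B replaces A's three-stage pipeline (build a comment-stripped copy of the string, re-strip it, split it on commas, then strip/filter the pieces) by a single left-to-right scan that tracks the quote state only to decide the comment cut and flushes a token buffer at every comma.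
import Mathlib
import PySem

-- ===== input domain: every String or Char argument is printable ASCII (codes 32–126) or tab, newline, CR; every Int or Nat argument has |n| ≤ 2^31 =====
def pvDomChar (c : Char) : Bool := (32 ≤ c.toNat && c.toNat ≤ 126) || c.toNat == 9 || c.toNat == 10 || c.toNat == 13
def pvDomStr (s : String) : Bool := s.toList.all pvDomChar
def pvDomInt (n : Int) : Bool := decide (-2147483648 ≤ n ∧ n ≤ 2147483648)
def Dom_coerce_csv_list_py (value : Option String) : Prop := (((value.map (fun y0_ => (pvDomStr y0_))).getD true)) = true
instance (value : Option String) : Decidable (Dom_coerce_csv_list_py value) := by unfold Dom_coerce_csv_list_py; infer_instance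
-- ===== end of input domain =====

-- B replaces A's "build a comment-stripped string, strip it, re-split on commas" pipeline by a
-- single left-to-right scan that flushes token buffers at commas (objective: alternative decomposition).


-- ===== PORT A =====
-- the while loop of _strip_inline_comment: i = index, quote state, `out` accumulator
def pvAScan : List Char → Nat → Option Char → List Char → List Char
  | [], _, _, out => out
  | c :: rest, i, quote, out =>
    match quote with
    | some q =>
      -- c == quote and (i+1 >= len(s) or s[i+1] != quote)  ⇔  c = q ∧ rest.head? ≠ some q
      if c = q ∧ rest.head? ≠ some q then pvAScan rest (i+1) none (out ++ [c])
      else pvAScan rest (i+1) (some q) (out ++ [c])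
    | none =>
      if c = '\'' ∨ c = '"' then pvAScan rest (i+1) (some c) (out ++ [c])
      else if c = '#' ∨ (c = ';' ∧ 0 < i) then out
      else pvAScan rest (i+1) none (out ++ [c])

-- _strip_inline_comment on a str argument (the None branch of the Python helper is unreachable here)
def pvStripInlineComment (s0 : List Char) : List Char :=
  let s := PySem.Chars.strip s0
  if s = [] then [] else PySem.Chars.strip (pvAScan s 0 none [])

-- _normalize_empty on an Optional[str] argument
def pvNormalizeEmpty : Option String → Option (List Char)
  | none => none
  | some v =>
    let s := PySem.Chars.strip v.toList
    if s = [] then none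
    else if PySem.Chars.lower s = "none".toList ∨ PySem.Chars.lower s = "null".toList then none
    else some s

def coerce_csv_list_py (value : Option String) : List String :=
  match pvNormalizeEmpty value with
  | none => []
  | some s =>
    let s := pvStripInlineComment s
    if s = [] then []
    else (PySem.Chars.splitOn s [',']).filterMap (fun x =>
      let y := PySem.Chars.strip x
      if y = [] then none else some (String.mk y))

-- ===== PORT B =====
-- one scan: quote state only gates the '#'/';' break; every ',' flushes the buffer as a token
def pvBScan : List Char → Nat → Option Char → List (List Char) → List Char → List (List Char)
  | [], _, _, toks, buf => toks ++ [buf]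
  | c :: rest, i, quote, toks, buf =>
    match quote with
    | some q =>
      let q' := if c = q ∧ rest.head? ≠ some q then none else some q
      if c = ',' then pvBScan rest (i+1) q' (toks ++ [buf]) []
      else pvBScan rest (i+1) q' toks (buf ++ [c])
    | none =>
      if c = '\'' ∨ c = '"' then pvBScan rest (i+1) (some c) toks (buf ++ [c])
      else if c = '#' ∨ (c = ';' ∧ 0 < i) then toks ++ [buf]
      else if c = ',' then pvBScan rest (i+1) none (toks ++ [buf]) []
      else pvBScan rest (i+1) none toks (buf ++ [c])

def coerce_csv_list_py_alt (value : Option String) : List String :=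
  match value with
  | none => []
  | some v =>
    let s := PySem.Chars.strip v.toList
    if s = [] ∨ PySem.Chars.lower s = "none".toList ∨ PySem.Chars.lower s = "null".toList then []
    else (pvBScan s 0 none [] []).filterMap (fun x =>
      let y := PySem.Chars.strip x
      if y = [] then none else some (String.mk y))

-- ===== PRECONDITION & SPEC =====
def Spec_coerce_csv_list_py (value : Option String) (out : List String) : Prop := out = coerce_csv_list_py_alt value
instance (value : Option String) (out : List String) : Decidable (Spec_coerce_csv_list_py value out) := by unfold Spec_coerce_csv_list_py; infer_instance

-- ===== CLAIM (what is proved, stated in full; the proofs are below) =====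
def Claim_equal_coerce_csv_list_py : Prop := ∀ (value : Option String), Dom_coerce_csv_list_py value → Spec_coerce_csv_list_py value (coerce_csv_list_py value)

-- ===== LEMMAS AND PROOFS =====
-- structural single-char comma split: (first token, remaining tokens)
def pvSplitP : List Char → List Char × List (List Char)
  | [] => ([], [])
  | c :: t =>
    let p := pvSplitP t
    if c = ',' then ([], p.1 :: p.2) else (c :: p.1, p.2)

def pvTokens (t : List Char) : List (List Char) := (pvSplitP t).1 :: (pvSplitP t).2

def pvTok (x : List Char) : Option String :=
  let y := PySem.Chars.strip x
  if y = [] then none else some (String.mk y)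

-- append an all-whitespace tail to the last token
def pvMapLast (w : List Char) : List (List Char) → List (List Char)
  | [] => []
  | [a] => [a ++ w]
  | a :: b :: l => a :: pvMapLast w (b :: l)

theorem pvSplitOn_go_eq (fuel : Nat) : ∀ (l cur : List Char) (acc : List (List Char)), l.length ≤ fuel →
    PySem.Chars.splitOn.go [','] fuel l cur acc
      = acc.reverse ++ (cur.reverse ++ (pvSplitP l).1) :: (pvSplitP l).2 := by
  induction fuel with
  | zero =>
    intro l cur acc h
    have : l = [] := List.eq_nil_of_length_eq_zero (Nat.le_zero.mp h)
    subst this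
    simp [PySem.Chars.splitOn.go, pvSplitP]
  | succ n ih =>
    intro l cur acc h
    match l with
    | [] => simp [PySem.Chars.splitOn.go, pvSplitP]
    | c :: rest =>
      rw [PySem.Chars.splitOn.go]
      by_cases hc : c = ','
      · have hp : [','].isPrefixOf (c :: rest) = true := by simp [hc, List.isPrefixOf]
        rw [if_pos hp]
        simp only [List.length_cons] at h
        rw [ih _ _ _ (by simp; omega)]
        simp [pvSplitP, hc]
      · have hp : ¬ [','].isPrefixOf (c :: rest) = true := by
          simp [List.isPrefixOf]; exact fun h' => hc h'.symm
        rw [if_neg hp]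
        simp only [List.length_cons] at h
        rw [ih _ _ _ (by omega)]
        simp [pvSplitP, hc]

theorem pvSplitOn_eq (l : List Char) : PySem.Chars.splitOn l [','] = pvTokens l := by
  unfold PySem.Chars.splitOn pvTokens
  rw [pvSplitOn_go_eq _ _ _ _ (by omega)]
  simp

-- comma-free prefixes pass through pvSplitP into the first token
theorem pvSplitP_append (buf : List Char) (l : List Char) (h : ',' ∉ buf) :
    pvSplitP (buf ++ l) = (buf ++ (pvSplitP l).1, (pvSplitP l).2) := by
  induction buf with
  | nil => simp
  | cons c t ih =>
    simp only [List.mem_cons, not_or] at h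
    have hc : ¬ c = ',' := fun h' => h.1 h'.symm
    simp [pvSplitP, ih h.2, hc]

theorem pvTokens_comma_free (buf : List Char) (hb : ',' ∉ buf) : pvTokens buf = [buf] := by
  unfold pvTokens
  have h := pvSplitP_append buf [] hb
  simp only [List.append_nil, pvSplitP] at h
  simp [h]

theorem pvTokens_comma (buf X : List Char) (hb : ',' ∉ buf) :
    pvTokens (buf ++ ',' :: X) = buf :: pvTokens X := by
  unfold pvTokens
  rw [pvSplitP_append buf _ hb]
  simp [pvSplitP]

theorem pv_comma_notmem {buf : List Char} {c : Char} (hb : ',' ∉ buf) (hc : ¬ c = ',') :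
    ',' ∉ buf ++ [c] := by
  simp only [List.mem_append, List.mem_singleton, not_or]
  exact ⟨hb, fun h => hc h.symm⟩

-- A's out-accumulator
theorem pvAScan_acc (s : List Char) : ∀ (i : Nat) (q : Option Char) (out : List Char),
    pvAScan s i q out = out ++ pvAScan s i q [] := by
  induction s with
  | nil => intro i q out; simp [pvAScan]
  | cons c rest ih =>
    intro i q out
    match q with
    | some qc =>
      simp only [pvAScan]
      split_ifs <;>
        first
          | (rw [ih (i+1) _ (out ++ [c]), ih (i+1) _ ([] ++ [c])]; simp)
          | simp
    | none =>
      simp only [pvAScan]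
      split_ifs <;>
        first
          | (rw [ih (i+1) _ (out ++ [c]), ih (i+1) _ ([] ++ [c])]; simp)
          | simp

-- the central bridge: B's scan produces exactly the comma-split of buf ++ A's cleaned string
theorem pvBScan_eq (s : List Char) : ∀ (i : Nat) (q : Option Char) (toks : List (List Char)) (buf : List Char),
    ',' ∉ buf →
    pvBScan s i q toks buf = toks ++ pvTokens (buf ++ pvAScan s i q []) := by
  induction s with
  | nil =>
    intro i q toks buf hb
    simp [pvBScan, pvAScan, pvTokens_comma_free buf hb]
  | cons c rest ih =>
    intro i q toks buf hb
    match q with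
    | some qc =>
      simp only [pvBScan, pvAScan]
      by_cases hcl : c = qc ∧ rest.head? ≠ some qc
      · simp only [if_pos hcl]
        by_cases hc : c = ','
        · subst hc
          rw [if_pos rfl, ih (i+1) none (toks ++ [buf]) [] (List.not_mem_nil),
            pvAScan_acc rest (i+1) none ([] ++ [','])]
          simp only [List.nil_append, List.singleton_append]
          rw [pvTokens_comma _ _ hb]
          simp
        · rw [if_neg hc, ih (i+1) none toks (buf ++ [c]) (pv_comma_notmem hb hc),
            pvAScan_acc rest (i+1) none ([] ++ [c])]
          simp
      · simp only [if_neg hcl]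
        by_cases hc : c = ','
        · subst hc
          rw [if_pos rfl, ih (i+1) (some qc) (toks ++ [buf]) [] (List.not_mem_nil),
            pvAScan_acc rest (i+1) (some qc) ([] ++ [','])]
          simp only [List.nil_append, List.singleton_append]
          rw [pvTokens_comma _ _ hb]
          simp
        · rw [if_neg hc, ih (i+1) (some qc) toks (buf ++ [c]) (pv_comma_notmem hb hc),
            pvAScan_acc rest (i+1) (some qc) ([] ++ [c])]
          simp
    | none =>
      simp only [pvBScan, pvAScan]
      by_cases hq : c = '\'' ∨ c = '"'
      · have hc : ¬ c = ',' := by rcases hq with h | h <;> simp [h]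
        simp only [if_pos hq]
        rw [ih (i+1) (some c) toks (buf ++ [c]) (pv_comma_notmem hb hc),
          pvAScan_acc rest (i+1) (some c) ([] ++ [c])]
        simp
      · simp only [if_neg hq]
        by_cases hbrk : c = '#' ∨ (c = ';' ∧ 0 < i)
        · simp only [if_pos hbrk]
          simp [pvTokens_comma_free buf hb]
        · simp only [if_neg hbrk]
          by_cases hc : c = ','
          · subst hc
            rw [if_pos rfl, ih (i+1) none (toks ++ [buf]) [] (List.not_mem_nil),
              pvAScan_acc rest (i+1) none ([] ++ [','])]
            simp only [List.nil_append, List.singleton_append]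
            rw [pvTokens_comma _ _ hb]
            simp
          · rw [if_neg hc, ih (i+1) none toks (buf ++ [c]) (pv_comma_notmem hb hc),
              pvAScan_acc rest (i+1) none ([] ++ [c])]
            simp

-- whitespace facts
theorem pvStrip_cons_ws (c : Char) (x : List Char) (h : PySem.Chars.isspace c = true) :
    PySem.Chars.strip (c :: x) = PySem.Chars.strip x := by
  simp [PySem.Chars.strip, PySem.Chars.lstrip, List.dropWhile_cons, h]

theorem pvRstrip_append_ws (z : List Char) (c : Char) (hc : PySem.Chars.isspace c = true) :
    PySem.Chars.rstrip (z ++ [c]) = PySem.Chars.rstrip z := by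
  simp [PySem.Chars.rstrip, List.dropWhile_cons, hc]

theorem pvStrip_append_one_ws (y : List Char) (c : Char) (hc : PySem.Chars.isspace c = true) :
    PySem.Chars.strip (y ++ [c]) = PySem.Chars.strip y := by
  unfold PySem.Chars.strip PySem.Chars.lstrip
  rw [List.dropWhile_append]
  by_cases h : (List.dropWhile PySem.Chars.isspace y).isEmpty
  · rw [if_pos h]
    simp only [List.isEmpty_iff] at h
    simp [List.dropWhile_cons, hc, h, PySem.Chars.rstrip]
  · rw [if_neg h]
    exact pvRstrip_append_ws _ _ hc

theorem pvStrip_append_ws (x w : List Char) (h : ∀ c ∈ w, PySem.Chars.isspace c = true) :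
    PySem.Chars.strip (x ++ w) = PySem.Chars.strip x := by
  induction w using List.reverseRecOn with
  | nil => simp
  | append_singleton t c ih =>
    rw [← List.append_assoc, pvStrip_append_one_ws _ _ (h c (by simp))]
    exact ih (fun d hd => h d (by simp [hd]))

theorem pvDropWhile_head_false {p : Char → Bool} (l : List Char) :
    ∀ d, (List.dropWhile p l).head? = some d → p d = false := by
  induction l with
  | nil => intro d h; simp at h
  | cons c t ih =>
    intro d h
    rw [List.dropWhile_cons] at h
    by_cases hp : p c
    · rw [if_pos hp] at h; exact ih d h
    · rw [if_neg hp] at h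
      simp only [List.head?_cons, Option.some.injEq] at h
      subst h
      exact Bool.eq_false_iff.mpr hp

theorem pvStrip_idem (x : List Char) : PySem.Chars.strip (PySem.Chars.strip x) = PySem.Chars.strip x := by
  unfold PySem.Chars.strip
  -- rstrip is idempotent
  have hr : ∀ z : List Char, PySem.Chars.rstrip (PySem.Chars.rstrip z) = PySem.Chars.rstrip z := by
    intro z
    unfold PySem.Chars.rstrip
    rw [List.reverse_reverse]
    congr 1
    exact List.dropWhile_idempotent _ _
  -- lstrip leaves rstrip (lstrip x) unchanged
  have hl : PySem.Chars.lstrip (PySem.Chars.rstrip (PySem.Chars.lstrip x))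
      = PySem.Chars.rstrip (PySem.Chars.lstrip x) := by
    have hpre : PySem.Chars.rstrip (PySem.Chars.lstrip x) <+: PySem.Chars.lstrip x := by
      unfold PySem.Chars.rstrip
      refine List.reverse_suffix.mp ?_
      rw [List.reverse_reverse]
      exact List.dropWhile_suffix _
    obtain ⟨u, hu⟩ := hpre
    cases hR : PySem.Chars.rstrip (PySem.Chars.lstrip x) with
    | nil => simp [PySem.Chars.lstrip]
    | cons d t =>
      have hd : PySem.Chars.isspace d = false := by
        apply pvDropWhile_head_false (p := PySem.Chars.isspace) x
        rw [hR] at hu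
        unfold PySem.Chars.lstrip at hu
        rw [← hu]
        simp
      simp [PySem.Chars.lstrip, List.dropWhile_cons, hd]
  rw [hl, hr]

-- appending an all-whitespace, comma-free tail only extends the last token
theorem pvTokens_append (t w : List Char) (hw : ',' ∉ w) :
    pvTokens (t ++ w) = pvMapLast w (pvTokens t) := by
  induction t with
  | nil =>
    have h := pvSplitP_append w [] hw
    simp only [List.append_nil, pvSplitP] at h
    simp [pvTokens, pvMapLast, pvSplitP, h]
  | cons c t' ih =>
    by_cases hc : c = ','
    · subst hc
      have e1 : pvTokens (',' :: (t' ++ w)) = [] :: pvTokens (t' ++ w) := by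
        simp [pvTokens, pvSplitP]
      have e2 : pvMapLast w (pvTokens (',' :: t')) = pvMapLast w ([] :: pvTokens t') := by
        simp [pvTokens, pvSplitP]
      rw [List.cons_append, e1, e2, ih]
      rfl
    · have e1 : pvTokens (c :: (t' ++ w))
          = (c :: (pvSplitP (t' ++ w)).1) :: (pvSplitP (t' ++ w)).2 := by
        simp [pvTokens, pvSplitP, hc]
      have e2 : pvTokens (c :: t') = (c :: (pvSplitP t').1) :: (pvSplitP t').2 := by
        simp [pvTokens, pvSplitP, hc]
      rw [List.cons_append, e1, e2]
      unfold pvTokens at ih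
      cases hT : (pvSplitP t').2 with
      | nil =>
        rw [hT] at ih
        simp only [pvMapLast] at ih ⊢
        simp only [List.cons.injEq] at ih
        simp [ih.1, ih.2]
      | cons b l =>
        rw [hT] at ih
        simp only [pvMapLast] at ih ⊢
        simp only [List.cons.injEq] at ih
        simp [ih.1, ih.2]

theorem pvFilterMap_mapLast (w : List Char)
    (hg : ∀ x, pvTok (x ++ w) = pvTok x) (m : List (List Char)) :
    (pvMapLast w m).filterMap pvTok = m.filterMap pvTok := by
  induction m with
  | nil => simp [pvMapLast]
  | cons a l ih =>
    cases l with
    | nil => simp [pvMapLast, List.filterMap_cons, hg a]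
    | cons b l' =>
      show (a :: pvMapLast w (b :: l')).filterMap pvTok = _
      simp only [List.filterMap_cons, ih]

theorem pvL1 (t : List Char) :
    (pvTokens (PySem.Chars.lstrip t)).filterMap pvTok = (pvTokens t).filterMap pvTok := by
  induction t with
  | nil => simp [PySem.Chars.lstrip]
  | cons c t' ih =>
    by_cases h : PySem.Chars.isspace c = true
    · have hl : PySem.Chars.lstrip (c :: t') = PySem.Chars.lstrip t' := by
        simp [PySem.Chars.lstrip, List.dropWhile_cons, h]
      have hc : ¬ c = ',' := by
        intro hc; subst hc; simp [PySem.Chars.isspace] at h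
      rw [hl, ih]
      have h1 : pvTokens (c :: t') = (c :: (pvSplitP t').1) :: (pvSplitP t').2 := by
        simp [pvTokens, pvSplitP, hc]
      have h2 : pvTok (c :: (pvSplitP t').1) = pvTok (pvSplitP t').1 := by
        simp [pvTok, pvStrip_cons_ws _ _ h]
      rw [h1]
      conv_lhs => rw [pvTokens]
      simp only [List.filterMap_cons, h2]
    · have hl : PySem.Chars.lstrip (c :: t') = c :: t' := by
        simp [PySem.Chars.lstrip, List.dropWhile_cons, h]
      rw [hl]

theorem pvL2 (t : List Char) :
    (pvTokens (PySem.Chars.rstrip t)).filterMap pvTok = (pvTokens t).filterMap pvTok := by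
  have hdecomp : t = PySem.Chars.rstrip t ++ (List.takeWhile PySem.Chars.isspace t.reverse).reverse := by
    unfold PySem.Chars.rstrip
    conv_lhs => rw [← List.reverse_reverse t,
      ← List.takeWhile_append_dropWhile (p := PySem.Chars.isspace) (l := t.reverse)]
    rw [List.reverse_append]
  have hws : ∀ c ∈ (List.takeWhile PySem.Chars.isspace t.reverse).reverse, PySem.Chars.isspace c = true := by
    intro c hc
    rw [List.mem_reverse] at hc
    exact List.mem_takeWhile_imp hc
  have hwcomma : ',' ∉ (List.takeWhile PySem.Chars.isspace t.reverse).reverse := by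
    intro hmem
    have := hws ',' hmem
    simp [PySem.Chars.isspace] at this
  conv_rhs => rw [hdecomp]
  rw [pvTokens_append _ _ hwcomma,
    pvFilterMap_mapLast _ (fun x => by simp [pvTok, pvStrip_append_ws x _ hws])]

theorem pvStripTokens (t : List Char) :
    (pvTokens (PySem.Chars.strip t)).filterMap pvTok = (pvTokens t).filterMap pvTok := by
  rw [PySem.Chars.strip, pvL2, pvL1]

theorem pvTok_nil : pvTok [] = none := by
  simp [pvTok, PySem.Chars.strip, PySem.Chars.lstrip, PySem.Chars.rstrip]

-- the non-guard case of the equivalence, on the already-stripped string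
theorem pvMain (s0 : List Char) (h1 : ¬ s0 = []) (hidem : PySem.Chars.strip s0 = s0) :
    (if pvStripInlineComment s0 = [] then []
     else (PySem.Chars.splitOn (pvStripInlineComment s0) [',']).filterMap pvTok)
    = (pvBScan s0 0 none [] []).filterMap pvTok := by
  have hA : pvStripInlineComment s0 = PySem.Chars.strip (pvAScan s0 0 none []) := by
    unfold pvStripInlineComment
    rw [hidem, if_neg h1]
  rw [hA, pvBScan_eq _ _ _ _ _ (List.not_mem_nil)]
  simp only [List.nil_append]
  rw [← pvStripTokens]
  by_cases hcl : PySem.Chars.strip (pvAScan s0 0 none []) = []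
  · rw [if_pos hcl, hcl]
    simp [pvTokens, pvSplitP, pvTok_nil]
  · rw [if_neg hcl, pvSplitOn_eq]

-- ===== VERDICT (by name: the statement is the Claim_ definition above) =====
theorem coerce_csv_list_py_spec : Claim_equal_coerce_csv_list_py := by
  intro value _
  unfold Spec_coerce_csv_list_py
  match value with
  | none => rfl
  | some v =>
    have hN : pvNormalizeEmpty (some v)
        = (if PySem.Chars.strip v.toList = [] then none
           else if PySem.Chars.lower (PySem.Chars.strip v.toList) = "none".toList ∨
               PySem.Chars.lower (PySem.Chars.strip v.toList) = "null".toList then none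
           else some (PySem.Chars.strip v.toList)) := rfl
    have hA : coerce_csv_list_py (some v)
        = (match pvNormalizeEmpty (some v) with
           | none => []
           | some s =>
             if pvStripInlineComment s = [] then []
             else (PySem.Chars.splitOn (pvStripInlineComment s) [',']).filterMap pvTok) := rfl
    have hB : coerce_csv_list_py_alt (some v)
        = (if (PySem.Chars.strip v.toList = [] ∨
               PySem.Chars.lower (PySem.Chars.strip v.toList) = "none".toList ∨
               PySem.Chars.lower (PySem.Chars.strip v.toList) = "null".toList) then []
           else (pvBScan (PySem.Chars.strip v.toList) 0 none [] []).filterMap pvTok) := rfl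
    rw [hA, hB, hN]
    by_cases h1 : PySem.Chars.strip v.toList = []
    · rw [if_pos h1, if_pos (Or.inl h1)]
    · rw [if_neg h1]
      by_cases h2 : PySem.Chars.lower (PySem.Chars.strip v.toList) = "none".toList ∨
          PySem.Chars.lower (PySem.Chars.strip v.toList) = "null".toList
      · rw [if_pos h2, if_pos (Or.inr h2)]
      · rw [if_neg h2, if_neg (not_or.mpr ⟨h1, h2⟩)]
        exact pvMain _ h1 (pvStrip_idem v.toList)
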